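-- pv_equiv track=rewrite | github.com/aryopg/mediqa | span_prediction_mcq/correction/preprocess_for_correction.py | parse_sentences
-- ===== SOURCE A (Python) =====
-- def parse_sentences(indexed_sents):
--
--     sents = indexed_sents.split('\n')
--     sents = [item.strip() for item in sents if item.strip()]
--
--     res = []
--     for sent in sents:
--         if not sent[0].isdigit() or " " not in sent:
--             idx, prev_sent = res.pop()
--             res.append((idx, prev_sent + " " + sent))
--         else:
--             idx, sent = sent.split(' ', 1)
--             res.append((int(idx), sent))
--
--     return dict(res)
-- ===== SOURCE B (Python) =====
-- def parse_sentences(indexed_sents):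
--     lines = [ln.strip() for ln in indexed_sents.split('\n')]
--     lines = [ln for ln in lines if ln]
--
--     # pass 1: segment lines into groups, one per indexed sentence
--     groups = []
--     for ln in lines:
--         if ln[0].isdigit() and " " in ln:
--             groups.append([ln])
--         else:
--             groups[-1].append(ln)
--
--     # pass 2: convert each group to an entry of the result dict
--     result = {}
--     for group in groups:
--         idx, text = group[0].split(' ', 1)
--         for cont in group[1:]:
--             text += " " + cont
--         result[int(idx)] = text
--     return result
-- ===== Notes on version B (the rewrite author's own statement) =====
-- stated objective: alternative
-- what changed: A interleaves parsing and merging in one fold that pops and rewrites the last entry of a result list; B first segments the stripped lines into groups (one per header line) and then converts each group independently into a dict entry, so the result list is never mutated.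
import Mathlib
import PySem

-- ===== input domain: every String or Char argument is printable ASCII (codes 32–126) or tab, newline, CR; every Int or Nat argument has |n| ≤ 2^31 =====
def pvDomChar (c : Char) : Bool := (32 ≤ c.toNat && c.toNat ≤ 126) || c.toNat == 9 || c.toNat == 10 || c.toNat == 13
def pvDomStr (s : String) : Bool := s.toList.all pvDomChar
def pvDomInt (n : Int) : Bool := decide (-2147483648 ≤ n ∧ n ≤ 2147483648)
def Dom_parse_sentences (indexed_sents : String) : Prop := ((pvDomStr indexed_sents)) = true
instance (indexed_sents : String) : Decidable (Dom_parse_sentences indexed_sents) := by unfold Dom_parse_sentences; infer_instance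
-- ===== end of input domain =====

-- B re-decomposes A: segment stripped lines into groups first, then convert each group to a dict
-- entry; same return value on Pre_ (where A does not raise); equal cost, objective 'alternative'.

-- ===== PORT A =====
def parse_sentences (indexed_sents : String) : List (Int × String) :=
  -- indexed_sents.split('\n')  (split? is some: the separator is nonempty)
  let sents := (PySem.Str.split? indexed_sents "\n").getD []
  let sents := (sents.map PySem.Str.strip).filter (fun item => item ≠ "")
  let res : List (Int × String) := sents.foldl (fun res sent =>
    if !(PySem.Chars.isdigit ((PySem.Str.pyGet? sent 0).getD ' ')) || !(PySem.Str.isIn " " sent) then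
      -- sent is nonempty (filtered), so pyGet?'s default is never used
      match res.getLast? with
      | none => res          -- res.pop() raises IndexError here; excluded by Pre_
      | some (idx, prev_sent) => res.dropLast ++ [(idx, prev_sent ++ " " ++ sent)]
    else
      match PySem.Str.splitMax? sent " " 1 with
      | some [idx, sent'] =>
        match PySem.Int.ofStr? idx with
        | some n => res ++ [(n, sent')]
        | none => res        -- int(idx) raises ValueError here; excluded by Pre_
      | _ => res             -- unreachable: ' ' ∈ sent gives exactly two parts
    ) []
  (PySem.Dict.ofList res).items

-- ===== PORT B =====
def parse_sentences_alt (indexed_sents : String) : List (Int × String) :=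
  let lines := ((((PySem.Str.split? indexed_sents "\n").getD []).map PySem.Str.strip).filter
    (fun ln => ln ≠ ""))
  -- pass 1: segment lines into groups, one per indexed sentence
  let groups : List (List String) := lines.foldl (fun groups ln =>
    if PySem.Chars.isdigit ((PySem.Str.pyGet? ln 0).getD ' ') && PySem.Str.isIn " " ln then
      groups ++ [[ln]]
    else
      -- groups[-1].append(ln); on an empty groups Python raises IndexError: excluded by Pre_
      (groups.getLast?).elim groups (fun g => groups.dropLast ++ [g ++ [ln]])
    ) []
  -- pass 2: convert each group to an entry of the result dict
  let result : PySem.Dict Int String := groups.foldl (fun d g =>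
    match g with
    | [] => d                -- unreachable: every group is created nonempty
    | hd :: rest =>
      -- idx, text = group[0].split(' ', 1): the separator is nonempty and occurs in the
      -- group's header line, so there are exactly two parts; headD defaults are unreachable
      let parts := (PySem.Str.splitMax? hd " " 1).getD []
      let idx := parts.headD ""
      let text0 := parts.tail.headD ""
      let text := rest.foldl (fun text cont => text ++ " " ++ cont) text0
      -- int(idx): a ValueError (ofStr? = none) is excluded by Pre_
      (PySem.Int.ofStr? idx).elim d (fun n => d.insert n text)
    ) PySem.Dict.empty
  result.items

-- ===== PRECONDITION & SPEC =====
-- Pre_ excludes exactly the inputs where the Python raises: a ValueError when a header line's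
-- first token is not a Python int literal, and an IndexError when the first stripped nonempty
-- line is a continuation (no leading digit or no space), so res.pop()/groups[-1] hits an empty list.
def Pre_parse_sentences (indexed_sents : String) : Prop :=
  let ls := ((((PySem.Str.split? indexed_sents "\n").getD []).map PySem.Str.strip).filter
    (fun ln => ln ≠ ""))
  (∀ ln ∈ ls, (PySem.Chars.isdigit ((PySem.Str.pyGet? ln 0).getD ' ')
        && PySem.Str.isIn " " ln) = true →
      (PySem.Str.splitMax? ln " " 1).isSome = true ∧
      ((PySem.Str.splitMax? ln " " 1).getD []).length = 2 ∧
      (PySem.Int.ofStr? (((PySem.Str.splitMax? ln " " 1).getD []).headD "")).isSome = true) ∧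
  (ls = [] ∨ (PySem.Chars.isdigit ((PySem.Str.pyGet? (ls.headD "") 0).getD ' ')
        && PySem.Str.isIn " " (ls.headD "")) = true)
instance (indexed_sents : String) : Decidable (Pre_parse_sentences indexed_sents) := by
  unfold Pre_parse_sentences; infer_instance
def pvWitness_parse_sentences : String := "1 hello\nworld\n2 bye"
def Spec_parse_sentences (indexed_sents : String) (out : List (Int × String)) : Prop :=
  out = parse_sentences_alt indexed_sents
instance (indexed_sents : String) (out : List (Int × String)) : Decidable (Spec_parse_sentences indexed_sents out) := by
  unfold Spec_parse_sentences; infer_instance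

-- ===== CLAIM (what is proved, stated in full; the proofs are below) =====
def Claim_equal_parse_sentences : Prop := ∀ (indexed_sents : String), Dom_parse_sentences indexed_sents → Pre_parse_sentences indexed_sents → Spec_parse_sentences indexed_sents (parse_sentences indexed_sents)

-- ===== LEMMAS AND PROOFS =====

-- proof-side abbreviations for the two fold bodies and the group conversion
def pvHdr (ln : String) : Bool :=
  PySem.Chars.isdigit ((PySem.Str.pyGet? ln 0).getD ' ') && PySem.Str.isIn " " ln

def pvStepA (res : List (Int × String)) (sent : String) : List (Int × String) :=
  if !(PySem.Chars.isdigit ((PySem.Str.pyGet? sent 0).getD ' ')) || !(PySem.Str.isIn " " sent) then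
    match res.getLast? with
    | none => res
    | some (idx, prev_sent) => res.dropLast ++ [(idx, prev_sent ++ " " ++ sent)]
  else
    match PySem.Str.splitMax? sent " " 1 with
    | some [idx, sent'] =>
      match PySem.Int.ofStr? idx with
      | some n => res ++ [(n, sent')]
      | none => res
    | _ => res

def pvStepG (groups : List (List String)) (ln : String) : List (List String) :=
  if pvHdr ln then groups ++ [[ln]]
  else (groups.getLast?).elim groups (fun g => groups.dropLast ++ [g ++ [ln]])

def pvConv? (g : List String) : Option (Int × String) :=
  match g with
  | [] => none
  | hd :: rest =>
    let parts := (PySem.Str.splitMax? hd " " 1).getD []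
    let idx := parts.headD ""
    let text0 := parts.tail.headD ""
    (PySem.Int.ofStr? idx).elim none
      (fun n => some (n, rest.foldl (fun text cont => text ++ " " ++ cont) text0))

def pvStepD (d : PySem.Dict Int String) (g : List String) : PySem.Dict Int String :=
  match g with
  | [] => d
  | hd :: rest =>
    let parts := (PySem.Str.splitMax? hd " " 1).getD []
    let idx := parts.headD ""
    let text0 := parts.tail.headD ""
    let text := rest.foldl (fun text cont => text ++ " " ++ cont) text0
    (PySem.Int.ofStr? idx).elim d (fun n => d.insert n text)

def pvF (g : List String) : Int × String := (pvConv? g).getD (0, "")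

-- a "good" header line: two split parts and a parseable index
def pvHdrOk (ln : String) : Prop :=
  (PySem.Str.splitMax? ln " " 1).isSome = true ∧
  ((PySem.Str.splitMax? ln " " 1).getD []).length = 2 ∧
  (PySem.Int.ofStr? (((PySem.Str.splitMax? ln " " 1).getD []).headD "")).isSome = true

lemma pvHdrOk_spec (ln : String) (h : pvHdrOk ln) :
    ∃ idx text0 n, PySem.Str.splitMax? ln " " 1 = some [idx, text0] ∧
      PySem.Int.ofStr? idx = some n := by
  obtain ⟨hsome, hlen, hint⟩ := h
  obtain ⟨parts, hp⟩ := Option.isSome_iff_exists.mp hsome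
  rw [hp] at hlen hint
  simp only [Option.getD_some] at hlen hint
  rcases parts with _ | ⟨idx, _ | ⟨text0, _ | ⟨c, r⟩⟩⟩ <;> simp at hlen
  simp only [List.headD_cons] at hint
  obtain ⟨n, hn⟩ := Option.isSome_iff_exists.mp hint
  exact ⟨idx, text0, n, hp, hn⟩

lemma pvConv?_append (g : List String) (ln : String) (n : Int) (t : String)
    (h : pvConv? g = some (n, t)) : pvConv? (g ++ [ln]) = some (n, t ++ " " ++ ln) := by
  match g with
  | [] => simp [pvConv?] at h
  | hd :: rest =>
    simp only [pvConv?, List.cons_append] at h ⊢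
    cases hi : PySem.Int.ofStr? (((PySem.Str.splitMax? hd " " 1).getD []).headD "") with
    | none => rw [hi] at h; simp at h
    | some m =>
      simp only [hi, Option.elim, Option.some.injEq, Prod.mk.injEq] at h ⊢
      exact ⟨h.1, by rw [List.foldl_append, h.2]; rfl⟩

-- the core invariant: A's fold over the lines is the image under pvF of B's group fold,
-- and every group produced is convertible
lemma pvCore (ls : List String) (gs : List (List String)) (res : List (Int × String))
    (hls : ∀ ln ∈ ls, pvHdr ln = true → pvHdrOk ln)
    (hgs : ∀ g ∈ gs, (pvConv? g).isSome = true)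
    (hres : res = gs.map pvF)
    (hstart : gs = [] → ∀ ln, ls.head? = some ln → pvHdr ln = true) :
    ls.foldl pvStepA res = (ls.foldl pvStepG gs).map pvF ∧
      ∀ g ∈ ls.foldl pvStepG gs, (pvConv? g).isSome = true := by
  induction ls generalizing gs res with
  | nil => exact ⟨hres, hgs⟩
  | cons ln ls ih =>
    simp only [List.foldl_cons]
    by_cases h : pvHdr ln = true
    · -- header line: both sides append a fresh entry / group
      obtain ⟨idx, text0, n, hs, hi⟩ := pvHdrOk_spec ln (hls ln (by simp) h)
      have hA : pvStepA res ln = res ++ [(n, text0)] := by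
        simp only [pvStepA]
        rw [if_neg]
        · simp [hs, hi]
        · simp only [pvHdr, Bool.and_eq_true] at h
          simp only [h.1, h.2]
          decide
      have hG : pvStepG gs ln = gs ++ [[ln]] := by simp [pvStepG, h]
      have hc : pvConv? [ln] = some (n, text0) := by simp [pvConv?, hs, hi]
      rw [hA, hG]
      apply ih
      · intro x hx hh; exact hls x (by simp [hx]) hh
      · intro g hg
        rcases List.mem_append.1 hg with hg | hg
        · exact hgs g hg
        · simp only [List.mem_singleton] at hg; subst hg; simp [hc]
      · simp [hres, pvF, hc]
      · intro habs; simp at habs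
    · -- continuation line: both sides extend the last entry / group
      have h' : pvHdr ln = false := by simpa using h
      match gs, hres with
      | [], hres =>
        exact absurd (hstart rfl ln rfl) (by simp [h'])
      | g0 :: gs', hres =>
        obtain ⟨gs'', g, hsplit⟩ : ∃ gs'' g, g0 :: gs' = gs'' ++ [g] :=
          ⟨(g0 :: gs').dropLast, (g0 :: gs').getLast (by simp),
            (List.dropLast_append_getLast (by simp)).symm⟩
        rw [hsplit] at hres hgs ⊢
        have hgood : (pvConv? g).isSome = true := hgs g (by simp)
        obtain ⟨⟨n, t⟩, hg⟩ := Option.isSome_iff_exists.1 hgood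
        have hA : pvStepA res ln = gs''.map pvF ++ [(n, t ++ " " ++ ln)] := by
          simp only [pvStepA]
          rw [if_pos]
          · rw [hres]
            simp [pvF, hg, List.getLast?_append, List.dropLast_append_of_ne_nil]
          · simp only [pvHdr] at h'
            rcases Bool.and_eq_false_iff.1 (by simpa [pvHdr] using h') with hh | hh <;>
              simp [hh]
        have hG : pvStepG (gs'' ++ [g]) ln = gs'' ++ [g ++ [ln]] := by
          simp [pvStepG, h', List.getLast?_append, List.dropLast_append_of_ne_nil]
        rw [hA, hG]
        apply ih
        · intro x hx hh; exact hls x (by simp [hx]) hh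
        · intro x hx
          rcases List.mem_append.1 hx with hx | hx
          · exact hgs x (by simp [hx])
          · simp only [List.mem_singleton] at hx; subst hx
            simp [pvConv?_append g ln n t hg]
        · simp [pvF, pvConv?_append g ln n t hg]
        · intro habs; simp at habs

-- the dict fold over good groups is the insert fold over their converted pairs
lemma pvDictFold (gs : List (List String)) (d : PySem.Dict Int String)
    (hgs : ∀ g ∈ gs, (pvConv? g).isSome = true) :
    gs.foldl pvStepD d = (gs.map pvF).foldl (fun acc p => acc.insert p.1 p.2) d := by
  induction gs generalizing d with
  | nil => rfl
  | cons g gs ih =>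
    have hgood := hgs g (by simp)
    obtain ⟨⟨n, t⟩, hg⟩ := Option.isSome_iff_exists.1 hgood
    have hstep : pvStepD d g = d.insert n t := by
      match g with
      | [] => simp [pvConv?] at hg
      | hd :: rest =>
        simp only [pvConv?] at hg
        simp only [pvStepD]
        cases hi : PySem.Int.ofStr? (((PySem.Str.splitMax? hd " " 1).getD []).headD "") with
        | none => rw [hi] at hg; simp at hg
        | some m =>
          simp only [hi, Option.elim, Option.some.injEq, Prod.mk.injEq] at hg
          simp only [hg.1]
          rw [← hg.2]
          simp [List.headD_eq_head?_getD, List.head?_tail]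
    simp only [List.foldl_cons, List.map_cons, hstep, pvF, hg, Option.getD_some]
    exact ih _ (fun x hx => hgs x (by simp [hx]))

-- ===== VERDICT (by name: the statement is the Claim_ definition above) =====
theorem parse_sentences_spec : Claim_equal_parse_sentences := by
  intro s _ hpre
  unfold Spec_parse_sentences parse_sentences parse_sentences_alt
  obtain ⟨h1, h2⟩ := hpre
  set ls := ((((PySem.Str.split? s "\n").getD []).map PySem.Str.strip).filter
    (fun ln => ln ≠ "")) with hls
  have hcore := pvCore ls [] [] (by intro ln hln hh; exact h1 ln hln hh) (by simp) (by simp)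
    (by intro _ ln hln
        rcases h2 with h2 | h2
        · rw [h2] at hln; simp at hln
        · obtain ⟨t, ht⟩ := List.head?_eq_some_iff.mp hln
          rw [ht] at h2
          simpa [pvHdr] using h2)
  have hG : ls.foldl (fun groups ln =>
      if PySem.Chars.isdigit ((PySem.Str.pyGet? ln 0).getD ' ') && PySem.Str.isIn " " ln then
        groups ++ [[ln]]
      else
        (groups.getLast?).elim groups (fun g => groups.dropLast ++ [g ++ [ln]])) [] = ls.foldl pvStepG [] := rfl
  have hD : ∀ (gs : List (List String)),
      gs.foldl (fun d g =>
        match g with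
        | [] => d
        | hd :: rest =>
          let parts := (PySem.Str.splitMax? hd " " 1).getD []
          let idx := parts.headD ""
          let text0 := parts.tail.headD ""
          let text := rest.foldl (fun text cont => text ++ " " ++ cont) text0
          (PySem.Int.ofStr? idx).elim d (fun n => d.insert n text)) PySem.Dict.empty = gs.foldl pvStepD PySem.Dict.empty := fun gs => rfl
  simp only [hG, hD]
  rw [pvDictFold _ _ hcore.2, ← hcore.1]
  rfl
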